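-- pv_equiv track=rewrite | github.com/mrti259/tda-i-tps | tp2/tp2/entrenamiento.py | mejor_ganancia_iterativo
-- ===== SOURCE A (Python) =====
-- from typing import Tuple, List
--
-- ENTRENO = 1
--
-- DESCANSO = 0
--
-- def _ganancia_del_dia(dia_entrenamiento, dia_desde_descanso, ganancia_por_dia, energia_por_dia) -> int:
--     if dia_entrenamiento == len(ganancia_por_dia):
--         return 0
--
--     ganancia = ganancia_por_dia[dia_entrenamiento]
--     energia = energia_por_dia[dia_desde_descanso]
--     return min(ganancia, energia)
--
-- def mejor_ganancia_iterativo(ganancia_por_dia, energia_por_dia) -> Tuple[int, List[int]]: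
--     cant_dias = len(ganancia_por_dia)
--
--     M = [[0 for _ in range(cant_dias+1)] for _ in range(cant_dias+1)]
--
--     for dia_a_analizar in range(cant_dias):
--         for dias_desde_descanso in range(dia_a_analizar + 1):
--             M[dia_a_analizar][dias_desde_descanso] = _ganancia_del_dia(dia_a_analizar, dias_desde_descanso, ganancia_por_dia, energia_por_dia)
--
--     for dia_a_analizar in range(cant_dias-1, -1, -1):
--         for dias_desde_descanso in range(dia_a_analizar + 1):
--             ganancia_si_descanso = M[dia_a_analizar+1][0]
--             ganancia_si_entreno = M[dia_a_analizar][dias_desde_descanso] + M[dia_a_analizar+1][dias_desde_descanso+1]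
--             M[dia_a_analizar][dias_desde_descanso] = max(ganancia_si_descanso, ganancia_si_entreno)
--
--     ganancia= M[0][0]
--     plan = _reconstruir_plan_de_entrenamiento_desde_memo(M, ganancia_por_dia, energia_por_dia)
--     return ganancia, plan
--
-- def _reconstruir_plan_de_entrenamiento_desde_memo(M, ganancia_por_dia, energia_por_dia) -> List[int]:
--     cant_dias = len(ganancia_por_dia)
--     plan = []
--
--     dias_desde_descanso = 0
--     for dia_a_analizar in range(cant_dias):
--         # el ultimo día siempre entreno
--         if dia_a_analizar == cant_dias - 1:
--             plan.append(ENTRENO)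
--             dias_desde_descanso += 1
--             continue
--
--         ganancia_optima = M[dia_a_analizar][dias_desde_descanso]
--         ganancia_del_dia = _ganancia_del_dia(dia_a_analizar, dias_desde_descanso, ganancia_por_dia, energia_por_dia)
--         ganancia_si_entreno = M[dia_a_analizar+1][dias_desde_descanso+1]
--
--         if ganancia_optima == ganancia_del_dia + ganancia_si_entreno:
--             plan.append(ENTRENO)
--             dias_desde_descanso += 1
--             continue
--
--         plan.append(DESCANSO)
--         dias_desde_descanso = 0
--
--     return plan
-- ===== SOURCE B (Python) =====
-- def mejor_ganancia_iterativo(ganancia_por_dia, energia_por_dia):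
--     n = len(ganancia_por_dia)
--     # 1-D DP over run lengths: best[j] holds the best gain from day d+1+j
--     # starting with a fresh streak; runs[j] the longest optimal run at day d+j.
--     best = [0, 0]
--     runs = []
--     for d in range(n - 1, -1, -1):
--         v, L, s = best[0], 0, 0         # L = 0 means: rest on day d
--         for k in range(1, n - d + 1):
--             s += min(ganancia_por_dia[d + k - 1], energia_por_dia[k - 1])
--             if s + best[k] >= v:        # prefer longer runs on ties
--                 v, L = s + best[k], k
--         best = [v] + best
--         runs = [L] + runs
--     # plan: each training run is followed by one rest day, except that the
--     # last day is always a training day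
--     plan = []
--     d = 0
--     while d < n:
--         L = runs[d]
--         if d + L >= n - 1:
--             plan += [1] * (n - d)
--             d = n
--         else:
--             plan += [1] * L + [0]
--             d += L + 1
--     return best[0], plan
-- ===== Notes on version B (the rewrite author's own statement) =====
-- stated objective: alternative
-- what changed: Replaces A's 2-D streak-indexed table (two nested passes over an (n+1)x(n+1) matrix plus a per-day traceback) by a 1-D run-length DP: best[d] is the best gain from day d with a fresh streak, computed by enumerating the length of the next uninterrupted training run, and the plan is rebuilt run-by-run from the stored longest optimal run lengths (longest run = A's train-on-ties traceback).
import Mathlib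
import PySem

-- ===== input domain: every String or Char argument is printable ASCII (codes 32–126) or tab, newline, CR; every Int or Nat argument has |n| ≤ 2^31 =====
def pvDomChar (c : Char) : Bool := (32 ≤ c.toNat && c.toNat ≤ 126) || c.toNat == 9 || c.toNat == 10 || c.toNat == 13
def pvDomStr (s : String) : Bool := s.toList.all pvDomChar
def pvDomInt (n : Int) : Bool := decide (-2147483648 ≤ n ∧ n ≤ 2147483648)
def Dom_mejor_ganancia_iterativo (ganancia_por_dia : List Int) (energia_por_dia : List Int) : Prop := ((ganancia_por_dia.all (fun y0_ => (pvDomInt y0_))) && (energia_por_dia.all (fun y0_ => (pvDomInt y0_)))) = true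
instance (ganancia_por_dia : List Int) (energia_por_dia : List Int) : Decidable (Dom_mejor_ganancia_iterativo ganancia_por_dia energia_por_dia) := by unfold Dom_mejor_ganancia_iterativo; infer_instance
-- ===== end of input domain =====

-- B replaces A's 2-D streak-indexed table (two nested passes over an (n+1)×(n+1) matrix plus a
-- per-day traceback) by a 1-D run-length DP over "best gain from day d with a fresh streak",
-- rebuilding the plan run-by-run from the stored longest optimal run lengths
-- (objective: alternative algorithm, same O(n^2) asymptotics).

-- ===== PORT A =====
-- All element reads `xs[i]` below have 0 ≤ i < len(xs) under Pre_, so `List.getD i 0`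
-- is exact there (outside Pre_ the Python raises IndexError and nothing is claimed).
def pvGet2 (M : List (List Int)) (i j : Nat) : Int := (M.getD i []).getD j 0

def pvSet2 (M : List (List Int)) (i j : Nat) (v : Int) : List (List Int) :=
  M.set i ((M.getD i []).set j v)

-- _ganancia_del_dia
def pvGdd (dia s : Nat) (gan en : List Int) : Int :=
  if dia = gan.length then 0 else min (gan.getD dia 0) (en.getD s 0)

-- first double loop of A (fills M[d][s] for s ≤ d with the day gains)
def pvPass1 (gan en : List Int) (M : List (List Int)) : List (List Int) :=
  (List.range gan.length).foldl (fun M d =>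
    (List.range (d+1)).foldl (fun M s => pvSet2 M d s (pvGdd d s gan en)) M) M

-- second double loop of A; Python's range(n-1, -1, -1) is (List.range n).reverse
def pvPass2 (n : Nat) (M : List (List Int)) : List (List Int) :=
  ((List.range n).reverse).foldl (fun M d =>
    (List.range (d+1)).foldl (fun M s =>
      pvSet2 M d s (max (pvGet2 M (d+1) 0) (pvGet2 M d s + pvGet2 M (d+1) (s+1)))) M) M

-- _reconstruir_plan_de_entrenamiento_desde_memo
def pvReconA (M : List (List Int)) (gan en : List Int) : List Int :=
  ((List.range gan.length).foldl (fun (st : List Int × Nat) d =>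
    if d = gan.length - 1 then (st.1 ++ [1], st.2 + 1)
    else if pvGet2 M d st.2 = pvGdd d st.2 gan en + pvGet2 M (d+1) (st.2+1)
    then (st.1 ++ [1], st.2 + 1)
    else (st.1 ++ [0], 0)) ([], 0)).1

def mejor_ganancia_iterativo (ganancia_por_dia : List Int) (energia_por_dia : List Int) : Int × List Int :=
  let n := ganancia_por_dia.length
  let M0 := List.replicate (n+1) (List.replicate (n+1) (0:Int))
  let M := pvPass2 n (pvPass1 ganancia_por_dia energia_por_dia M0)
  (pvGet2 M 0 0, pvReconA M ganancia_por_dia energia_por_dia)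

-- ===== PORT B =====
-- inner loop of Source B over run lengths k = 1 .. n-d; state (v, L, s)
def pvInnerB (gan en : List Int) (bl : List Int) (d : Nat) : Int × Nat × Int :=
  (List.range' 1 (gan.length - d)).foldl
    (fun (t : Int × Nat × Int) k =>
      let s := t.2.2 + min (gan.getD (d + k - 1) 0) (en.getD (k - 1) 0)
      if t.1 ≤ s + bl.getD k 0 then (s + bl.getD k 0, k, s) else (t.1, t.2.1, s))
    (bl.getD 0 0, 0, 0)

-- outer loop of Source B: d = n-1 .. 0, consing onto `best` and `runs`
def pvOuterB (gan en : List Int) : List Int × List Nat :=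
  ((List.range gan.length).reverse).foldl
    (fun (st : List Int × List Nat) d =>
      let r := pvInnerB gan en st.1 d
      (r.1 :: st.1, r.2.1 :: st.2))
    ([0, 0], [])

-- the while-loop building the plan run-by-run
def pvPlanB (runs : List Nat) (n : Nat) (d : Nat) (plan : List Int) : List Int :=
  if _h : d < n then
    if n - 1 ≤ d + runs.getD d 0 then plan ++ List.replicate (n - d) 1
    else pvPlanB runs n (d + runs.getD d 0 + 1) (plan ++ List.replicate (runs.getD d 0) 1 ++ [0])
  else plan
termination_by n - d

def mejor_ganancia_iterativo_alt (ganancia_por_dia : List Int) (energia_por_dia : List Int) : Int × List Int :=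
  let st := pvOuterB ganancia_por_dia energia_por_dia
  (st.1.getD 0 0, pvPlanB st.2 ganancia_por_dia.length 0 [])

-- ===== PRECONDITION & SPEC =====
-- Pre_ excludes exactly the inputs where Python A raises IndexError: the first pass reads
-- energia_por_dia[s] for every s < len(ganancia_por_dia), so it needs len(energia) ≥ len(ganancia).
def Pre_mejor_ganancia_iterativo (ganancia_por_dia : List Int) (energia_por_dia : List Int) : Prop :=
  ganancia_por_dia.length ≤ energia_por_dia.length

instance (ganancia_por_dia : List Int) (energia_por_dia : List Int) : Decidable (Pre_mejor_ganancia_iterativo ganancia_por_dia energia_por_dia) := by unfold Pre_mejor_ganancia_iterativo; infer_instance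

def pvWitness_mejor_ganancia_iterativo : List Int × List Int := ([3, 5, 2], [4, 1, 1])

def Spec_mejor_ganancia_iterativo (ganancia_por_dia : List Int) (energia_por_dia : List Int) (out : Int × List Int) : Prop := out = mejor_ganancia_iterativo_alt ganancia_por_dia energia_por_dia
instance (ganancia_por_dia : List Int) (energia_por_dia : List Int) (out : Int × List Int) : Decidable (Spec_mejor_ganancia_iterativo ganancia_por_dia energia_por_dia out) := by unfold Spec_mejor_ganancia_iterativo; infer_instance

-- ===== CLAIM (what is proved, stated in full; the proofs are below) =====
def Claim_equal_mejor_ganancia_iterativo : Prop := ∀ (ganancia_por_dia : List Int) (energia_por_dia : List Int), Dom_mejor_ganancia_iterativo ganancia_por_dia energia_por_dia → Pre_mejor_ganancia_iterativo ganancia_por_dia energia_por_dia → Spec_mejor_ganancia_iterativo ganancia_por_dia energia_por_dia (mejor_ganancia_iterativo ganancia_por_dia energia_por_dia)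

-- ===== LEMMAS AND PROOFS =====

-- reference value function: best gain from day d with streak s
def pvV (gan en : List Int) (d s : Nat) : Int :=
  if _h : d < gan.length then
    max (pvV gan en (d+1) 0) (min (gan.getD d 0) (en.getD s 0) + pvV gan en (d+1) (s+1))
  else 0
termination_by gan.length - d

lemma pvV_stop (gan en : List Int) (d s : Nat) (h : gan.length ≤ d) : pvV gan en d s = 0 := by
  rw [pvV]; simp [Nat.not_lt.mpr h]

lemma pvV_step (gan en : List Int) (d s : Nat) (h : d < gan.length) :
    pvV gan en d s = max (pvV gan en (d+1) 0)
      (min (gan.getD d 0) (en.getD s 0) + pvV gan en (d+1) (s+1)) := by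
  rw [pvV]; simp [h]

lemma getD_set {α : Type} (l : List α) (i j : Nat) (v d : α) :
    (l.set i v).getD j d = if i = j ∧ j < l.length then v else l.getD j d := by
  simp only [List.getD_eq_getElem?_getD, List.getElem?_set]
  by_cases h1 : i = j
  · subst h1
    by_cases h2 : i < l.length
    · simp [h2]
    · simp only [h2, and_false, if_false, if_true]
      rw [List.getElem?_eq_none (by omega)]
  · simp [h1]

lemma getD_replicate'' {α : Type} (n j : Nat) (x : α) : (List.replicate n x).getD j x = x := by
  by_cases h : j < n
  · simp
  · rw [List.getD_eq_getElem?_getD, List.getElem?_eq_none (by simp; omega)]; rfl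

lemma rowfold_getD (G : List Int → Nat → Int)
    (hG : ∀ (r : List Int) (i : Nat) (v : Int) (s : Nat), i ≠ s → G (r.set i v) s = G r s)
    (k : Nat) (r : List Int) (hk : k ≤ r.length) :
    (∀ j, ((List.range k).foldl (fun r s => r.set s (G r s)) r).getD j 0
        = if j < k then G r j else r.getD j 0)
    ∧ (∀ s, k ≤ s → G ((List.range k).foldl (fun r s => r.set s (G r s)) r) s = G r s)
    ∧ ((List.range k).foldl (fun r s => r.set s (G r s)) r).length = r.length := by
  induction k with
  | zero => simp
  | succ k ih =>
    obtain ⟨ih1, ih2, ih3⟩ := ih (by omega)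
    rw [List.range_succ, List.foldl_append, List.foldl_cons, List.foldl_nil]
    have hGk : G ((List.range k).foldl (fun r s => r.set s (G r s)) r) k
        = G r k := ih2 k le_rfl
    refine ⟨?_, ?_, ?_⟩
    · intro j
      rw [getD_set, ih3, hGk, ih1]
      by_cases h1 : j = k
      · subst h1; simp [Nat.lt_of_lt_of_le (Nat.lt_succ_self j) hk]
      · split_ifs <;> first | rfl | omega
    · intro s hs
      rw [hG _ k _ s (by omega), ih2 s (by omega)]
    · rw [List.length_set, ih3]

lemma innerfold (d : Nat) (F : List Int → List Int → Nat → Int) :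
    ∀ (L : List Nat) (M : List (List Int)), d < M.length →
    L.foldl (fun M s => pvSet2 M d s (F (M.getD d []) (M.getD (d+1) []) s)) M
    = M.set d (L.foldl (fun r s => r.set s (F r (M.getD (d+1) []) s)) (M.getD d [])) := by
  intro L
  induction L with
  | nil =>
    intro M hd
    simp only [List.foldl_nil]
    rw [List.getD_eq_getElem _ _ hd, List.set_getElem_self]
  | cons a L ih =>
    intro M hd
    simp only [List.foldl_cons]
    have hset : pvSet2 M d a (F (M.getD d []) (M.getD (d+1) []) a)
        = M.set d ((M.getD d []).set a (F (M.getD d []) (M.getD (d+1) []) a)) := rfl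
    rw [hset, ih _ (by simp [hd])]
    have h1 : (M.set d ((M.getD d []).set a (F (M.getD d []) (M.getD (d+1) []) a))).getD (d+1) []
        = M.getD (d+1) [] := by rw [getD_set]; simp
    have h2 : (M.set d ((M.getD d []).set a (F (M.getD d []) (M.getD (d+1) []) a))).getD d []
        = (M.getD d []).set a (F (M.getD d []) (M.getD (d+1) []) a) := by
      rw [getD_set]; simp [hd]
    rw [h1, h2, List.set_set]

lemma pvGet2_replicate (n m d j : Nat) :
    pvGet2 (List.replicate n (List.replicate m (0:Int))) d j = 0 := by
  rw [pvGet2]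
  by_cases hd : d < n
  · rw [List.getD_replicate _ hd]
    exact getD_replicate'' m j 0
  · have h0 : (List.replicate n (List.replicate m (0:Int))).getD d [] = [] := by
      rw [List.getD_eq_getElem?_getD, List.getElem?_eq_none (by simp; omega)]; rfl
    rw [h0]
    rfl

lemma pass1_char (gan en : List Int) :
    ∀ k, k ≤ gan.length →
    let M := (List.range k).foldl (fun M d =>
      (List.range (d+1)).foldl (fun M s => pvSet2 M d s (pvGdd d s gan en)) M)
      (List.replicate (gan.length+1) (List.replicate (gan.length+1) (0:Int)))
    M.length = gan.length+1
    ∧ (∀ d, d < gan.length+1 → (M.getD d []).length = gan.length+1)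
    ∧ (∀ d j, pvGet2 M d j = if d < k ∧ j ≤ d then pvGdd d j gan en else 0) := by
  intro k hk
  induction k with
  | zero =>
    refine ⟨by simp, ?_, ?_⟩
    · intro d hd
      simp only [List.foldl_nil, List.range_zero]
      rw [List.getD_replicate _ hd]
      simp
    · intro d j
      simp only [List.foldl_nil, List.range_zero]
      rw [pvGet2_replicate]
      simp
  | succ k ih =>
    obtain ⟨ih1, ih2, ih3⟩ := ih (by omega)
    rw [List.range_succ, List.foldl_append, List.foldl_cons, List.foldl_nil]
    set M := (List.range k).foldl (fun M d =>
      (List.range (d+1)).foldl (fun M s => pvSet2 M d s (pvGdd d s gan en)) M)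
      (List.replicate (gan.length+1) (List.replicate (gan.length+1) (0:Int))) with hM
    have hkM : k < M.length := by rw [ih1]; omega
    have hinner := innerfold k (fun _ _ s => pvGdd k s gan en) (List.range (k+1)) M hkM
    beta_reduce at hinner
    rw [hinner]
    have hrlen : (M.getD k []).length = gan.length + 1 := ih2 k (by omega)
    obtain ⟨hr1, -, hr3⟩ := rowfold_getD (fun _ s => pvGdd k s gan en)
      (fun _ _ _ _ _ => rfl) (k+1) (M.getD k []) (by omega)
    refine ⟨by simp [ih1], ?_, ?_⟩
    · intro d hd
      rw [getD_set]
      split_ifs with h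
      · rw [hr3, hrlen]
      · exact ih2 d hd
    · intro d j
      have hmd := ih3 d j
      rw [pvGet2] at hmd ⊢
      rw [getD_set]
      by_cases h : k = d ∧ d < M.length
      · obtain ⟨rfl, hlt⟩ := h
        rw [if_pos ⟨rfl, hlt⟩, hr1 j]
        have hmk := ih3 k j
        rw [pvGet2] at hmk
        by_cases hj : j < k + 1
        · rw [if_pos hj, if_pos ⟨by omega, by omega⟩]
        · rw [if_neg hj, hmk, if_neg (by omega), if_neg (by omega : ¬(k < k + 1 ∧ j ≤ k))]
      · rw [if_neg h, hmd]
        have hdk : ¬ d = k := fun hdd => h ⟨hdd.symm, by rw [ih1]; omega⟩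
        split_ifs <;> first | rfl | omega

lemma pass2_char (gan en : List Int) :
    ∀ k, k ≤ gan.length → ∀ M : List (List Int),
    M.length = gan.length+1 →
    (∀ d, d < gan.length+1 → (M.getD d []).length = gan.length+1) →
    (∀ d j, d < k → pvGet2 M d j = if j ≤ d then pvGdd d j gan en else 0) →
    (∀ d j, k ≤ d → d ≤ gan.length → j ≤ d → pvGet2 M d j = pvV gan en d j) →
    (∀ d j, d ≤ gan.length → j ≤ d →
      pvGet2 (((List.range k).reverse).foldl (fun M d =>
        (List.range (d+1)).foldl (fun M s =>
          pvSet2 M d s (max (pvGet2 M (d+1) 0) (pvGet2 M d s + pvGet2 M (d+1) (s+1)))) M) M) d j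
      = pvV gan en d j) := by
  intro k
  induction k with
  | zero =>
    intro hk M hlen hrows h1 h2 d j hd hj
    simp only [List.range_zero, List.reverse_nil, List.foldl_nil]
    exact h2 d j (Nat.zero_le d) hd hj
  | succ k ih =>
    intro hk M hlen hrows h1 h2 d j hd hj
    have hrev : (List.range (k+1)).reverse = k :: (List.range k).reverse := by
      rw [List.range_succ, List.reverse_append]
      rfl
    rw [hrev, List.foldl_cons]
    have hkM : k < M.length := by rw [hlen]; omega
    have hinner := innerfold k
      (fun r next s => max (next.getD 0 0) (r.getD s 0 + next.getD (s+1) 0))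
      (List.range (k+1)) M hkM
    beta_reduce at hinner
    have hrlen : (M.getD k []).length = gan.length + 1 := hrows k (by omega)
    have hG : ∀ (r : List Int) (i : Nat) (v : Int) (s : Nat), i ≠ s →
        (fun r s => max ((M.getD (k+1) []).getD 0 0)
          (r.getD s 0 + (M.getD (k+1) []).getD (s+1) 0)) (r.set i v) s
        = (fun r s => max ((M.getD (k+1) []).getD 0 0)
          (r.getD s 0 + (M.getD (k+1) []).getD (s+1) 0)) r s := by
      intro r i v s his
      beta_reduce
      rw [getD_set, if_neg (by tauto)]
    obtain ⟨hr1, -, hr3⟩ := rowfold_getD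
      (fun r s => max ((M.getD (k+1) []).getD 0 0)
        (r.getD s 0 + (M.getD (k+1) []).getD (s+1) 0)) hG
      (k+1) (M.getD k []) (by rw [hrlen]; omega)
    simp only [pvGet2] at hinner ⊢
    rw [hinner]
    set R := (List.range (k+1)).foldl (fun r s => r.set s
      (max ((M.getD (k+1) []).getD 0 0) (r.getD s 0 + (M.getD (k+1) []).getD (s+1) 0)))
      (M.getD k []) with hRdef
    have IH := ih (by omega) (M.set k R)
      (by rw [List.length_set, hlen])
      (by
        intro d' hd'
        rw [getD_set]
        split_ifs with h
        · rw [hr3, hrlen]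
        · exact hrows d' hd')
      (by
        intro d' j' hd'
        have := h1 d' j' (by omega)
        rw [pvGet2] at this
        rw [pvGet2, getD_set, if_neg (by rintro ⟨rfl, -⟩; omega)]
        exact this)
      (by
        intro d' j' hkd' hd' hj'
        by_cases hdk : d' = k
        · subst hdk
          rw [pvGet2, getD_set, if_pos ⟨rfl, hkM⟩, hr1 j', if_pos (by omega)]
          have hnext0 := h2 (d'+1) 0 (by omega) (by omega) (by omega)
          have hnextj := h2 (d'+1) (j'+1) (by omega) (by omega) (by omega)
          have hcur := h1 d' j' (by omega)
          rw [pvGet2] at hnext0 hnextj hcur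
          rw [if_pos hj'] at hcur
          rw [hnext0, hnextj, hcur]
          rw [pvGdd, if_neg (by omega)]
          exact (pvV_step gan en d' j' (by omega)).symm
        · rw [pvGet2, getD_set, if_neg (by rintro ⟨rfl, -⟩; exact hdk rfl)]
          have := h2 d' j' (by omega) hd' hj'
          rw [pvGet2] at this
          exact this)
    have goal := IH d j hd hj
    simp only [pvGet2] at goal
    exact goal

lemma M2_char (gan en : List Int) (d j : Nat) (hd : d ≤ gan.length) (hj : j ≤ d) :
    pvGet2 (pvPass2 gan.length (pvPass1 gan en
      (List.replicate (gan.length+1) (List.replicate (gan.length+1) (0:Int))))) d j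
    = pvV gan en d j := by
  obtain ⟨p1, p2, p3⟩ := pass1_char gan en gan.length le_rfl
  simp only [pvPass1] at p1 p2 p3 ⊢
  simp only [pvPass2]
  refine pass2_char gan en gan.length le_rfl _ p1 p2 ?_ ?_ d j hd hj
  · intro d' j' hd'
    rw [p3 d' j']
    split_ifs <;> first | rfl | omega
  · intro d' j' h1' h2' hj'
    rw [p3 d' j', if_neg (by omega), pvV_stop gan en d' j' (by omega)]

-- ===== B-side reference: run-length analysis =====

-- gain of the k-th day of a run that started on day d
def pvCday (gan en : List Int) (d s : Nat) : Int := min (gan.getD d 0) (en.getD s 0)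

-- total gain of the first k days of a run starting on day d
def pvS (gan en : List Int) (d : Nat) : Nat → Int
  | 0 => 0
  | k+1 => pvS gan en d k + pvCday gan en (d+k) k

-- value of the option "train exactly L days from day d, then rest"
def pvT (gan en : List Int) (d L : Nat) : Int := pvS gan en d L + pvV gan en (d+L+1) 0

-- max of pvT over run lengths 0..m (upward, as the inner loop scans)
def pvMaxUp (gan en : List Int) (d : Nat) : Nat → Int
  | 0 => pvT gan en d 0
  | m+1 => max (pvMaxUp gan en d m) (pvT gan en d (m+1))

-- max of pvT over run lengths k..(n-d) (downward, as pvV unrolls)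
def pvMaxGe (gan en : List Int) (d k : Nat) : Int :=
  if k < gan.length - d then max (pvT gan en d k) (pvMaxGe gan en d (k+1)) else pvT gan en d k
termination_by gan.length - d - k

def pvTmax (gan en : List Int) (d : Nat) : Int := pvMaxUp gan en d (gan.length - d)

-- the longest optimal run length at day d
def pvLstar (gan en : List Int) (d : Nat) : Nat :=
  Nat.findGreatest (fun j => pvT gan en d j = pvTmax gan en d) (gan.length - d)

lemma pvMaxGe_stop (gan en : List Int) (d k : Nat) (h : ¬ k < gan.length - d) :
    pvMaxGe gan en d k = pvT gan en d k := by rw [pvMaxGe]; simp [h]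

lemma pvMaxGe_step (gan en : List Int) (d k : Nat) (h : k < gan.length - d) :
    pvMaxGe gan en d k = max (pvT gan en d k) (pvMaxGe gan en d (k+1)) := by
  rw [pvMaxGe]; simp [h]

-- pvV unrolled over the length of the current run
lemma pvV_maxGe (gan en : List Int) (d : Nat) :
    ∀ m k, gan.length - d - k = m → k ≤ gan.length - d →
    pvV gan en (d+k) k + pvS gan en d k = pvMaxGe gan en d k := by
  intro m
  induction m with
  | zero =>
    intro k hm hk
    have hk' : k = gan.length - d := by omega
    rw [pvMaxGe_stop gan en d k (by omega), pvV_stop gan en (d+k) k (by omega), pvT]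
    rw [pvV_stop gan en (d+k+1) 0 (by omega)]
    omega
  | succ m ih =>
    intro k hm hk
    have hdk : d + k < gan.length := by omega
    rw [pvV_step gan en (d+k) k hdk, pvMaxGe_step gan en d k (by omega)]
    have hih := ih (k+1) (by omega) (by omega)
    have hshift : d + k + 1 = d + (k+1) := by omega
    have h2 : min (gan.getD (d+k) 0) (en.getD k 0) + pvV gan en (d+k+1) (k+1) + pvS gan en d k
        = pvMaxGe gan en d (k+1) := by
      rw [hshift] at *
      have hS : pvS gan en d (k+1) = pvS gan en d k + pvCday gan en (d+k) k := rfl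
      rw [pvCday] at hS
      omega
    have h1 : pvV gan en (d+k+1) 0 + pvS gan en d k = pvT gan en d k := by
      rw [pvT]; omega
    omega

lemma pvMaxGe_ge (gan en : List Int) (d : Nat) :
    ∀ m k i, gan.length - d - k = m → k ≤ i → i ≤ gan.length - d →
    pvT gan en d i ≤ pvMaxGe gan en d k := by
  intro m
  induction m with
  | zero =>
    intro k i hm hki hi
    have : i = k := by omega
    subst this
    rw [pvMaxGe_stop gan en d i (by omega)]
  | succ m ih =>
    intro k i hm hki hi
    rw [pvMaxGe_step gan en d k (by omega)]
    rcases Nat.eq_or_lt_of_le hki with h | h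
    · subst h; exact le_max_left _ _
    · exact le_trans (ih (k+1) i (by omega) (by omega) hi) (le_max_right _ _)

lemma pvMaxGe_attained (gan en : List Int) (d : Nat) :
    ∀ m k, gan.length - d - k = m → k ≤ gan.length - d →
    ∃ i, k ≤ i ∧ i ≤ gan.length - d ∧ pvT gan en d i = pvMaxGe gan en d k := by
  intro m
  induction m with
  | zero =>
    intro k hm hkle
    exact ⟨k, le_rfl, hkle, (pvMaxGe_stop gan en d k (by omega)).symm⟩
  | succ m ih =>
    intro k hm hkle
    rw [pvMaxGe_step gan en d k (by omega)]
    obtain ⟨i, hi1, hi2, hi3⟩ := ih (k+1) (by omega) (by omega)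
    rcases le_total (pvT gan en d k) (pvMaxGe gan en d (k+1)) with h | h
    · exact ⟨i, by omega, hi2, by rw [hi3, max_eq_right h]⟩
    · exact ⟨k, le_rfl, by omega, by rw [max_eq_left h]⟩

lemma pvMaxGe_attained' (gan en : List Int) (d k : Nat) (hk : k ≤ gan.length - d) :
    ∃ i, k ≤ i ∧ i ≤ gan.length - d ∧ pvT gan en d i = pvMaxGe gan en d k :=
  pvMaxGe_attained gan en d _ k rfl hk

lemma pvMaxUp_ge (gan en : List Int) (d : Nat) :
    ∀ m i, i ≤ m → pvT gan en d i ≤ pvMaxUp gan en d m := by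
  intro m
  induction m with
  | zero => intro i hi; simp at hi; subst hi; exact le_rfl
  | succ m ih =>
    intro i hi
    rw [pvMaxUp]
    rcases Nat.lt_succ_iff_lt_or_eq.mp (Nat.lt_succ_of_le hi) with h | h
    · exact le_trans (ih i (by omega)) (le_max_left _ _)
    · subst h; exact le_max_right _ _

lemma pvMaxUp_attained (gan en : List Int) (d : Nat) :
    ∀ m, ∃ i, i ≤ m ∧ pvT gan en d i = pvMaxUp gan en d m := by
  intro m
  induction m with
  | zero => exact ⟨0, le_rfl, rfl⟩
  | succ m ih =>
    obtain ⟨i, hi1, hi2⟩ := ih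
    rw [pvMaxUp]
    rcases le_total (pvMaxUp gan en d m) (pvT gan en d (m+1)) with h | h
    · exact ⟨m+1, le_rfl, by rw [max_eq_right h]⟩
    · exact ⟨i, by omega, by rw [hi2, max_eq_left h]⟩

lemma pvTmax_eq_maxGe (gan en : List Int) (d : Nat) :
    pvTmax gan en d = pvMaxGe gan en d 0 := by
  apply le_antisymm
  · obtain ⟨i, hi1, hi2⟩ := pvMaxUp_attained gan en d (gan.length - d)
    rw [pvTmax, ← hi2]
    exact pvMaxGe_ge gan en d _ 0 i rfl (Nat.zero_le i) hi1
  · obtain ⟨i, hi1, hi2, hi3⟩ := pvMaxGe_attained' gan en d 0 (Nat.zero_le _)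
    rw [← hi3, pvTmax]
    exact pvMaxUp_ge gan en d _ i hi2

lemma pvT_lstar (gan en : List Int) (d : Nat) :
    pvT gan en d (pvLstar gan en d) = pvTmax gan en d := by
  obtain ⟨i, hi1, hi2⟩ := pvMaxUp_attained gan en d (gan.length - d)
  exact Nat.findGreatest_spec (P := fun j => pvT gan en d j = pvTmax gan en d) hi1 hi2

lemma pvLstar_le (gan en : List Int) (d : Nat) : pvLstar gan en d ≤ gan.length - d :=
  Nat.findGreatest_le _

lemma pvV_zero_eq_Tmax (gan en : List Int) (d : Nat) : pvV gan en d 0 = pvTmax gan en d := by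
  have h := pvV_maxGe gan en d _ 0 rfl (Nat.zero_le _)
  rw [pvTmax_eq_maxGe]
  simpa [pvS] using h

lemma cond_iff (gan en : List Int) (d k : Nat) (hk : k < gan.length - d) :
    (pvV gan en (d+k) k = pvCday gan en (d+k) k + pvV gan en (d+k+1) (k+1))
    ↔ pvMaxGe gan en d k = pvMaxGe gan en d (k+1) := by
  have h1 := pvV_maxGe gan en d _ k rfl (by omega)
  have h2 := pvV_maxGe gan en d _ (k+1) rfl (by omega)
  have hS : pvS gan en d (k+1) = pvS gan en d k + pvCday gan en (d+k) k := rfl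
  have hshift : d + (k+1) = d + k + 1 := by omega
  rw [hshift] at h2
  omega

lemma greedy_train (gan en : List Int) (d k : Nat) (hk : k < pvLstar gan en d) :
    pvV gan en (d+k) k = pvCday gan en (d+k) k + pvV gan en (d+k+1) (k+1) := by
  have hL := pvLstar_le gan en d
  have hkn : k < gan.length - d := by omega
  apply (cond_iff gan en d k hkn).mpr
  have h1 : pvT gan en d k ≤ pvMaxGe gan en d (k+1) := by
    calc pvT gan en d k ≤ pvTmax gan en d := by
          rw [pvTmax]; exact pvMaxUp_ge gan en d _ k (by omega)
      _ = pvT gan en d (pvLstar gan en d) := (pvT_lstar gan en d).symm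
      _ ≤ pvMaxGe gan en d (k+1) := pvMaxGe_ge gan en d _ (k+1) (pvLstar gan en d) rfl (by omega) hL
  rw [pvMaxGe_step gan en d k hkn, max_eq_right h1]

lemma greedy_stop (gan en : List Int) (d : Nat)
    (hd : d + pvLstar gan en d < gan.length - 1) :
    ¬ (pvV gan en (d + pvLstar gan en d) (pvLstar gan en d)
        = pvCday gan en (d + pvLstar gan en d) (pvLstar gan en d)
          + pvV gan en (d + pvLstar gan en d + 1) (pvLstar gan en d + 1)) := by
  set L := pvLstar gan en d with hLdef
  have hLn : L < gan.length - d := by omega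
  intro hcond
  have heq := (cond_iff gan en d L hLn).mp hcond
  obtain ⟨i, hi1, hi2, hi3⟩ := pvMaxGe_attained' gan en d (L+1) (by omega)
  have hTL : pvT gan en d L ≤ pvMaxGe gan en d L := pvMaxGe_ge gan en d _ L L rfl le_rfl (by omega)
  have hTmaxL : pvT gan en d L = pvTmax gan en d := pvT_lstar gan en d
  have hTi_le : pvT gan en d i ≤ pvTmax gan en d := by
    rw [pvTmax]; exact pvMaxUp_ge gan en d _ i hi2
  have hTi_eq : pvT gan en d i = pvTmax gan en d := by
    have : pvT gan en d i = pvMaxGe gan en d L := by rw [hi3, heq]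
    omega
  have hgr := Nat.findGreatest_is_greatest (P := fun j => pvT gan en d j = pvTmax gan en d)
    (by omega : pvLstar gan en d < i) hi2
  exact hgr hTi_eq

lemma getD_map_range {α : Type} (f : Nat → α) (t j : Nat) (dflt : α) :
    ((List.range t).map f).getD j dflt = if j < t then f j else dflt := by
  by_cases h : j < t
  · rw [List.getD_eq_getElem?_getD, List.getElem?_map, List.getElem?_range h]
    simp [h]
  · rw [List.getD_eq_getElem?_getD, List.getElem?_eq_none (by simp; omega)]
    simp [h]

-- the inner loop computes (max option value, longest argmax, run gain so far)
lemma innerB_char (gan en : List Int) (d : Nat) (bl : List Int)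
    (hbl : ∀ j, bl.getD j 0 = pvV gan en (d+1+j) 0) :
    ∀ m, (List.range' 1 m).foldl
      (fun (t : Int × Nat × Int) k =>
        let s := t.2.2 + min (gan.getD (d + k - 1) 0) (en.getD (k - 1) 0)
        if t.1 ≤ s + bl.getD k 0 then (s + bl.getD k 0, k, s) else (t.1, t.2.1, s))
      (bl.getD 0 0, 0, 0)
    = (pvMaxUp gan en d m,
       Nat.findGreatest (fun j => pvT gan en d j = pvMaxUp gan en d m) m,
       pvS gan en d m) := by
  intro m
  induction m with
  | zero =>
    simp only [List.range'_zero, List.foldl_nil, pvMaxUp, Nat.findGreatest]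
    have h0 : bl.getD 0 0 = pvT gan en d 0 := by
      rw [hbl 0, pvT]
      simp [pvS]
    rw [h0]
    rfl
  | succ m ih =>
    have hconcat : List.range' 1 (m+1) = List.range' 1 m ++ [1+m] := by
      rw [List.range'_concat]
      norm_num
    rw [hconcat, List.foldl_append, ih, List.foldl_cons, List.foldl_nil]
    have hidx : d + (1+m) - 1 = d + m := by omega
    have hidx2 : 1 + m - 1 = m := by omega
    have hS : pvS gan en d m + min (gan.getD (d+m) 0) (en.getD m 0) = pvS gan en d (m+1) := by
      rw [show pvS gan en d (m+1) = pvS gan en d m + pvCday gan en (d+m) m from rfl, pvCday]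
    have hopt : pvS gan en d (m+1) + bl.getD (1+m) 0 = pvT gan en d (m+1) := by
      rw [hbl (1+m), pvT, show d + (m+1) + 1 = d + 1 + (1+m) from by omega]
    simp only [hidx, hidx2, hS, hopt]
    by_cases hle : pvMaxUp gan en d m ≤ pvT gan en d (m+1)
    · rw [if_pos hle]
      have hmax : pvMaxUp gan en d (m+1) = pvT gan en d (m+1) := by
        rw [pvMaxUp, max_eq_right hle]
      rw [hmax]
      have hfg : Nat.findGreatest (fun j => pvT gan en d j = pvT gan en d (m+1)) (m+1) = m+1 := by
        rw [Nat.findGreatest_succ, if_pos rfl]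
      rw [hfg, show (1+m) = m+1 from by omega]
    · rw [if_neg hle]
      have hmax : pvMaxUp gan en d (m+1) = pvMaxUp gan en d m := by
        rw [pvMaxUp, max_eq_left (by omega)]
      rw [hmax]
      have hfg : Nat.findGreatest (fun j => pvT gan en d j = pvMaxUp gan en d m) (m+1)
          = Nat.findGreatest (fun j => pvT gan en d j = pvMaxUp gan en d m) m := by
        rw [Nat.findGreatest_succ, if_neg (by omega)]
      rw [hfg]

lemma pv_map_range_succ {α : Type} (f : Nat → α) (t : Nat) :
    (List.range (t+1)).map f = f 0 :: (List.range t).map (fun j => f (j+1)) := by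
  rw [List.range_succ_eq_map, List.map_cons, List.map_map]
  rfl

-- the outer loop builds the tables of pvV and pvLstar
lemma outerB_char (gan en : List Int) :
    pvOuterB gan en = ((List.range (gan.length + 2)).map (fun j => pvV gan en j 0),
                       (List.range gan.length).map (fun j => pvLstar gan en j)) := by
  have key : ∀ m, m ≤ gan.length →
      ((List.range m).reverse).foldl
        (fun (st : List Int × List Nat) d =>
          let r := pvInnerB gan en st.1 d
          (r.1 :: st.1, r.2.1 :: st.2))
        ((List.range (gan.length - m + 2)).map (fun j => pvV gan en (m + j) 0),
         (List.range (gan.length - m)).map (fun j => pvLstar gan en (m + j)))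
      = ((List.range (gan.length + 2)).map (fun j => pvV gan en j 0),
         (List.range gan.length).map (fun j => pvLstar gan en j)) := by
    intro m
    induction m with
    | zero =>
      intro _
      simp only [List.range_zero, List.reverse_nil, List.foldl_nil, Nat.sub_zero, Nat.zero_add]
    | succ m ih =>
      intro hm
      have hrev : (List.range (m+1)).reverse = m :: (List.range m).reverse := by
        rw [List.range_succ, List.reverse_append]; rfl
      rw [hrev, List.foldl_cons]
      set bl := (List.range (gan.length - (m+1) + 2)).map (fun j => pvV gan en (m + 1 + j) 0)
        with hbldef
      have hbl : ∀ j, bl.getD j 0 = pvV gan en (m+1+j) 0 := by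
        intro j
        rw [hbldef, getD_map_range]
        split_ifs with h
        · rfl
        · rw [pvV_stop gan en (m+1+j) 0 (by omega)]
      have hinner : pvInnerB gan en bl m
          = (pvMaxUp gan en m (gan.length - m),
             Nat.findGreatest (fun j => pvT gan en m j = pvMaxUp gan en m (gan.length - m))
               (gan.length - m),
             pvS gan en m (gan.length - m)) := by
        rw [pvInnerB]
        exact innerB_char gan en m bl hbl (gan.length - m)
      have hv : pvMaxUp gan en m (gan.length - m) = pvV gan en m 0 := by
        rw [show pvMaxUp gan en m (gan.length - m) = pvTmax gan en m from rfl,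
            ← pvV_zero_eq_Tmax]
      have hL : Nat.findGreatest (fun j => pvT gan en m j = pvMaxUp gan en m (gan.length - m))
          (gan.length - m) = pvLstar gan en m := rfl
      simp only [hinner]
      rw [hL, hv]
      have hbest : pvV gan en m 0 :: bl
          = (List.range (gan.length - m + 2)).map (fun j => pvV gan en (m + j) 0) := by
        rw [show gan.length - m + 2 = (gan.length - (m+1) + 2) + 1 from by omega,
            pv_map_range_succ, hbldef]
        simp only [Nat.add_zero]
        congr 1
        apply List.map_congr_left
        intro j _
        have h : m + 1 + j = m + (j + 1) := by omega
        rw [h]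
      have hruns : pvLstar gan en m :: (List.range (gan.length - (m+1))).map
            (fun j => pvLstar gan en (m + 1 + j))
          = (List.range (gan.length - m)).map (fun j => pvLstar gan en (m + j)) := by
        rw [show gan.length - m = (gan.length - (m+1)) + 1 from by omega, pv_map_range_succ]
        simp only [Nat.add_zero]
        congr 1
        apply List.map_congr_left
        intro j _
        have h : m + 1 + j = m + (j + 1) := by omega
        rw [h]
      rw [hbest, hruns]
      exact ih (by omega)
  have h0 := key gan.length le_rfl
  rw [pvOuterB]
  have hinit : ((List.range (gan.length - gan.length + 2)).map
        (fun j => pvV gan en (gan.length + j) 0),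
      (List.range (gan.length - gan.length)).map (fun j => pvLstar gan en (gan.length + j)))
      = (([0, 0] : List Int), ([] : List Nat)) := by
    rw [Nat.sub_self]
    simp only [List.range_zero, List.map_nil]
    congr 1
    show (List.range 2).map (fun j => pvV gan en (gan.length + j) 0) = [0, 0]
    rw [show (2:Nat) = 1 + 1 from rfl, List.range_succ, List.range_succ, List.range_zero]
    simp only [List.nil_append, List.map_append, List.map_cons, List.map_nil]
    rw [pvV_stop gan en (gan.length + 0) 0 (by omega), pvV_stop gan en (gan.length + 1) 0 (by omega)]
    rfl
  rw [← hinit]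
  exact h0

-- the per-day step of A's reconstruction, phrased on pvV
def pvVstep (gan en : List Int) : (List Int × Nat) → Nat → (List Int × Nat) :=
  fun st t =>
    if t = gan.length - 1 then (st.1 ++ [1], st.2 + 1)
    else if pvV gan en t st.2 = pvCday gan en t st.2 + pvV gan en (t+1) (st.2+1)
    then (st.1 ++ [1], st.2 + 1)
    else (st.1 ++ [0], 0)

-- a block of days that all train appends a block of 1s
lemma chunk (gan en : List Int) :
    ∀ m t s p,
    (∀ i, i < m → (t + i = gan.length - 1 ∨
        pvV gan en (t+i) (s+i) = pvCday gan en (t+i) (s+i) + pvV gan en (t+i+1) (s+i+1))) →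
    (List.range' t m).foldl (pvVstep gan en) (p, s) = (p ++ List.replicate m 1, s + m) := by
  intro m
  induction m with
  | zero => intro t s p _; simp
  | succ m ih =>
    intro t s p hyp
    rw [List.range'_succ, List.foldl_cons]
    have hstep : pvVstep gan en (p, s) t = (p ++ [1], s + 1) := by
      rw [pvVstep]
      by_cases h1 : t = gan.length - 1
      · rw [if_pos h1]
      · rcases hyp 0 (by omega) with h | h
        · simp only [Nat.add_zero] at h
          exact absurd h h1
        · simp only [Nat.add_zero] at h
          rw [if_neg h1, if_pos h]
    rw [hstep, ih (t+1) (s+1) (p ++ [1])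
      (by
        intro i hi
        rcases hyp (i+1) (by omega) with h | h
        · left; omega
        · right
          rw [show t+1+i = t+(i+1) from by omega, show s+1+i = s+(i+1) from by omega]
          exact h)]
    rw [List.append_assoc,
        show ([1] ++ List.replicate m 1) = List.replicate (m+1) (1:Int) from rfl,
        show s+1+m = s+(m+1) from by omega]

-- the pvV-phrased walk from day d equals B's run-by-run plan builder
lemma vfold_plan (gan en : List Int) (runs : List Nat)
    (hruns : ∀ j, j < gan.length → runs.getD j 0 = pvLstar gan en j) :
    ∀ fuel d p, gan.length - d = fuel →
    ((List.range' d (gan.length - d)).foldl (pvVstep gan en) (p, 0)).1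
      = pvPlanB runs gan.length d p := by
  intro fuel
  induction fuel using Nat.strong_induction_on with
  | _ fuel IH =>
    intro d p hfuel
    by_cases hd : d < gan.length
    · have hL : runs.getD d 0 = pvLstar gan en d := hruns d hd
      have hLle : pvLstar gan en d ≤ gan.length - d := pvLstar_le gan en d
      rw [pvPlanB, dif_pos hd]
      by_cases hlast : gan.length - 1 ≤ d + runs.getD d 0
      · rw [if_pos hlast]
        rw [chunk gan en (gan.length - d) d 0 p
          (by
            intro i hi
            by_cases hiL : i < pvLstar gan en d
            · right
              have := greedy_train gan en d i hiL
              simpa using this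
            · left; omega)]
      · rw [if_neg hlast]
        rw [hL] at hlast ⊢
        set L := pvLstar gan en d with hLdef
        have hLlt : L < gan.length - d := by omega
        have hsplit : List.range' d (gan.length - d)
            = List.range' d L ++ List.range' (d + L) (gan.length - d - L) := by
          rw [List.range'_append_1]
          congr 1
          omega
        rw [hsplit, List.foldl_append]
        rw [chunk gan en L d 0 p
          (by
            intro i hi
            right
            have := greedy_train gan en d i hi
            simpa using this)]
        obtain ⟨w, hw⟩ : ∃ w, gan.length - d - L = w + 1 := ⟨gan.length - d - L - 1, by omega⟩
        have hsucc : List.range' (d + L) (gan.length - d - L)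
            = (d + L) :: List.range' (d + L + 1) w := by
          rw [hw, List.range'_succ]
        rw [hsucc, List.foldl_cons]
        have hrest : pvVstep gan en (p ++ List.replicate L 1, 0 + L) (d + L)
            = ((p ++ List.replicate L 1) ++ [0], 0) := by
          rw [pvVstep]
          simp only [Nat.zero_add]
          rw [if_neg (by omega), if_neg (greedy_stop gan en d (by omega))]
        rw [hrest]
        have hiw := IH (gan.length - (d + L + 1)) (by omega) (d + L + 1)
          ((p ++ List.replicate L 1) ++ [0]) rfl
        rw [show w = gan.length - (d + L + 1) from by omega, hiw, List.append_assoc]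
    · rw [pvPlanB, dif_neg hd]
      rw [show gan.length - d = 0 from by omega]
      simp

-- A's reconstruction walk agrees with the pvV-phrased walk (streak ≤ current day)
lemma reconA_V (gan en : List Int) :
    ∀ k d0, d0 + k = gan.length → ∀ st : List Int × Nat, st.2 ≤ d0 →
    (List.range' d0 k).foldl (fun (st : List Int × Nat) d =>
      if d = gan.length - 1 then (st.1 ++ [1], st.2 + 1)
      else if pvGet2 (pvPass2 gan.length (pvPass1 gan en
          (List.replicate (gan.length+1) (List.replicate (gan.length+1) (0:Int))))) d st.2
        = pvGdd d st.2 gan en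
          + pvGet2 (pvPass2 gan.length (pvPass1 gan en
            (List.replicate (gan.length+1) (List.replicate (gan.length+1) (0:Int))))) (d+1) (st.2+1)
      then (st.1 ++ [1], st.2 + 1)
      else (st.1 ++ [0], 0)) st
    = (List.range' d0 k).foldl (pvVstep gan en) st := by
  intro k
  induction k with
  | zero => intro d0 _ st _; rfl
  | succ k ih =>
    intro d0 hsum st hst
    rw [List.range'_succ, List.foldl_cons, List.foldl_cons]
    by_cases hlast : d0 = gan.length - 1
    · have hstep : pvVstep gan en st d0 = (st.1 ++ [1], st.2 + 1) := by
        rw [pvVstep, if_pos hlast]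
      rw [if_pos hlast, hstep]
      exact ih (d0+1) (by omega) _ (by simp; omega)
    · have hd0 : d0 < gan.length := by omega
      have hcond : (pvGet2 (pvPass2 gan.length (pvPass1 gan en
            (List.replicate (gan.length+1) (List.replicate (gan.length+1) (0:Int))))) d0 st.2
          = pvGdd d0 st.2 gan en
            + pvGet2 (pvPass2 gan.length (pvPass1 gan en
              (List.replicate (gan.length+1) (List.replicate (gan.length+1) (0:Int))))) (d0+1) (st.2+1))
          ↔ (pvV gan en d0 st.2 = pvCday gan en d0 st.2 + pvV gan en (d0+1) (st.2+1)) := by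
        rw [M2_char gan en d0 st.2 (by omega) hst,
            M2_char gan en (d0+1) (st.2+1) (by omega) (by omega),
            pvGdd, if_neg (by omega), pvCday]
      rw [if_neg hlast]
      by_cases hc : pvV gan en d0 st.2 = pvCday gan en d0 st.2 + pvV gan en (d0+1) (st.2+1)
      · have hstep : pvVstep gan en st d0 = (st.1 ++ [1], st.2 + 1) := by
          rw [pvVstep, if_neg hlast, if_pos hc]
        rw [if_pos (hcond.mpr hc), hstep]
        exact ih (d0+1) (by omega) _ (by simp; omega)
      · have hstep : pvVstep gan en st d0 = (st.1 ++ [0], 0) := by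
          rw [pvVstep, if_neg hlast, if_neg hc]
        rw [if_neg (fun h => hc (hcond.mp h)), hstep]
        exact ih (d0+1) (by omega) _ (by simp)

-- ===== VERDICT (by name: the statement is the Claim_ definition above) =====
theorem mejor_ganancia_iterativo_spec : Claim_equal_mejor_ganancia_iterativo := by
  intro gan en _hdom _hpre
  unfold Spec_mejor_ganancia_iterativo
  simp only [mejor_ganancia_iterativo, mejor_ganancia_iterativo_alt, outerB_char]
  have hruns : ∀ j, j < gan.length →
      ((List.range gan.length).map (fun j => pvLstar gan en j)).getD j 0 = pvLstar gan en j := by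
    intro j hj
    rw [getD_map_range, if_pos hj]
  have hplan := vfold_plan gan en ((List.range gan.length).map (fun j => pvLstar gan en j))
    hruns (gan.length - 0) 0 [] rfl
  rw [Nat.sub_zero] at hplan
  congr 1
  · rw [M2_char gan en 0 0 (by omega) le_rfl, getD_map_range, if_pos (by omega)]
  · rw [pvReconA, List.range_eq_range',
        reconA_V gan en gan.length 0 (by omega) ([], 0) (by omega)]
    rw [List.range_eq_range'] at hplan
    exact hplan
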